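-- pv_equiv track=rewrite | github.com/y3vhenii/Data-Structures-and-Algorithms | KruskalsMST.py | notInSameSet
-- ===== SOURCE A (Python) =====
-- def notInSameSet(source, destination, dictionary):
--     temp = source
--     # Keep looping until we hit the farthest parent
--     while temp != dictionary[temp]:
--         temp = dictionary[temp]
--
--     fromRoot = temp
--
--     # Keep looping until we hit the farthest parent
--     temp = destination
--     while temp != dictionary[temp]:
--         temp = dictionary[temp]
--     toRoot = temp
--
--     # Return True if not the same, otherwise return False
--     return toRoot != fromRoot
-- ===== SOURCE B (Python) =====
-- # B: applies the parent map exactly len(dictionary) times instead of looping to a fixed point;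
-- # a terminating parent chain has at most len(dictionary) distinct keys, so the root is reached
-- # within that many steps and, being a fixed point, further applications stay there.
-- def notInSameSet(source, destination, dictionary):
--     def rootOf(x):
--         for _ in range(len(dictionary)):
--             x = dictionary[x]
--         return x
--     return rootOf(source) != rootOf(destination)
-- ===== Notes on version B (the rewrite author's own statement) =====
-- stated objective: alternative
-- what changed: A chases each parent chain with a while-loop until it hits a self-parent; B instead applies the parent map a fixed len(dictionary) times (the root is reached within that many steps on any terminating chain and is a fixed point), then compares the two results.
import Mathlib
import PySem

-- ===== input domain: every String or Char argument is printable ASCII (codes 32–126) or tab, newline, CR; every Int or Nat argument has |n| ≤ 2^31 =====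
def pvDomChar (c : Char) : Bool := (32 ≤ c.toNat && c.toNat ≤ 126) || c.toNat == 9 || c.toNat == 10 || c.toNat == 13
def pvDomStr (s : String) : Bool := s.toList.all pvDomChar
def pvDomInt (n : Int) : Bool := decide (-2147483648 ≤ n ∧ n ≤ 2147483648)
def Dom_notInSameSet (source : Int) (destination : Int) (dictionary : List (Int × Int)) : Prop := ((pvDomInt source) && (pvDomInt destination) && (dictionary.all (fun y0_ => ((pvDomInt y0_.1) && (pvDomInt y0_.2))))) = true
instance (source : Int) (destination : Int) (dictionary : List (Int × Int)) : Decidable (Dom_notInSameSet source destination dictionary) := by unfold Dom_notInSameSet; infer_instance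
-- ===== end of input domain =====

-- B replaces A's fixed-point while-loops by applying the parent map exactly len(dictionary) times
-- (enough to reach the root of any terminating chain); alternative algorithm, same result on Pre_.


-- ===== PORT A =====
-- the 'while temp != dictionary[temp]: temp = dictionary[temp]' loop, fuel-bounded;
-- none = KeyError (missing key) or fuel exhausted (the loop did not reach a root)
def pvWhileParent (dictionary : List (Int × Int)) : Nat → Int → Option Int
  | 0, _ => none
  | fuel + 1, temp =>
    match PySem.Dict.get? (PySem.Dict.mk dictionary) temp with
    | none => none
    | some p => if temp ≠ p then pvWhileParent dictionary fuel p else some temp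

def notInSameSet (source : Int) (destination : Int) (dictionary : List (Int × Int)) : Bool :=
  match pvWhileParent dictionary (dictionary.length + 1) source with
  | none => false   -- unreachable under Pre_notInSameSet
  | some fromRoot =>
    match pvWhileParent dictionary (dictionary.length + 1) destination with
    | none => false -- unreachable under Pre_notInSameSet
    | some toRoot => toRoot != fromRoot

-- ===== PORT B =====
-- 'for _ in range(len(dictionary)): x = dictionary[x]' — a fold over the range list;
-- none = KeyError somewhere along the way (excluded by Pre_notInSameSet)
def pvRootOf (dictionary : List (Int × Int)) (x : Int) : Option Int :=
  (List.range dictionary.length).foldl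
    (fun o _ => o.bind (fun y => PySem.Dict.get? (PySem.Dict.mk dictionary) y)) (some x)

def notInSameSet_alt (source : Int) (destination : Int) (dictionary : List (Int × Int)) : Bool :=
  match pvRootOf dictionary source, pvRootOf dictionary destination with
  | some rs, some rt => rs != rt
  | _, _ => false   -- unreachable under Pre_notInSameSet

-- ===== PRECONDITION & SPEC =====
-- Pre_ excludes exactly the inputs on which Python A does not return: a missing key (KeyError) or a
-- parent chain that never reaches a root (the while-loop diverges). Closed form: some ancestor of the
-- node at depth ≤ |dictionary| — the k-th iterate of the parent map — is its own parent (a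
-- terminating chain visits pairwise-distinct keys, so its root is reached within |dictionary| steps).
def Pre_notInSameSet (source : Int) (destination : Int) (dictionary : List (Int × Int)) : Prop :=
  (∃ k < dictionary.length + 1,
    (((fun o => o.bind (fun y => PySem.Dict.get? (PySem.Dict.mk dictionary) y))^[k]) (some source)).any
      (fun r => PySem.Dict.get? (PySem.Dict.mk dictionary) r == some r) = true) ∧
  (∃ k < dictionary.length + 1,
    (((fun o => o.bind (fun y => PySem.Dict.get? (PySem.Dict.mk dictionary) y))^[k]) (some destination)).any
      (fun r => PySem.Dict.get? (PySem.Dict.mk dictionary) r == some r) = true)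

instance (source : Int) (destination : Int) (dictionary : List (Int × Int)) : Decidable (Pre_notInSameSet source destination dictionary) := by unfold Pre_notInSameSet; infer_instance

def pvWitness_notInSameSet : Int × Int × (List (Int × Int)) := (1, 3, [(1, 2), (2, 2), (3, 3)])

def Spec_notInSameSet (source : Int) (destination : Int) (dictionary : List (Int × Int)) (out : Bool) : Prop := out = notInSameSet_alt source destination dictionary
instance (source : Int) (destination : Int) (dictionary : List (Int × Int)) (out : Bool) : Decidable (Spec_notInSameSet source destination dictionary out) := by unfold Spec_notInSameSet; infer_instance

-- ===== CLAIM (what is proved, stated in full; the proofs are below) =====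
def Claim_equal_notInSameSet : Prop := ∀ (source : Int) (destination : Int) (dictionary : List (Int × Int)), Dom_notInSameSet source destination dictionary → Pre_notInSameSet source destination dictionary → Spec_notInSameSet source destination dictionary (notInSameSet source destination dictionary)

-- ===== LEMMAS AND PROOFS =====

-- proof-side helper: the k-th ancestor, recursion form of the iterate used in Pre_
def pvIterParent (dictionary : List (Int × Int)) : Nat → Int → Option Int
  | 0, x => some x
  | k + 1, x => (PySem.Dict.get? (PySem.Dict.mk dictionary) x).bind (pvIterParent dictionary k)

theorem pvIterParent_eq_iterate (dictionary : List (Int × Int)) (k : Nat) : ∀ (x : Int),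
    pvIterParent dictionary k x =
      ((fun o => o.bind (fun y => PySem.Dict.get? (PySem.Dict.mk dictionary) y))^[k]) (some x) := by
  induction k with
  | zero => intro x; rfl
  | succ k ih =>
    intro x
    rw [Function.iterate_succ_apply]
    simp only [pvIterParent, Option.bind_some]
    cases hget : PySem.Dict.get? (PySem.Dict.mk dictionary) x with
    | none =>
      simp only [Option.bind_none]
      clear ih hget
      induction k with
      | zero => rfl
      | succ k ihk => rw [Function.iterate_succ_apply, Option.bind_none]; exact ihk
    | some p => simp only [Option.bind_some]; exact ih p

-- a foldl that ignores the list elements is an iterate of the step function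
theorem foldl_const_eq_iterate {α β : Type} (f : α → α) (l : List β) :
    ∀ (o : α), l.foldl (fun o _ => f o) o = f^[l.length] o := by
  induction l with
  | nil => intro o; rfl
  | cons b l ih =>
    intro o
    rw [List.foldl_cons, List.length_cons, Function.iterate_succ_apply]
    exact ih (f o)

-- B's helper is the |dictionary|-th iterate of the parent map
theorem pvRootOf_eq_iter (dictionary : List (Int × Int)) (x : Int) :
    pvRootOf dictionary x = pvIterParent dictionary dictionary.length x := by
  rw [pvRootOf, pvIterParent_eq_iterate, foldl_const_eq_iterate, List.length_range]

theorem pvIterParent_add (dictionary : List (Int × Int)) (k m : Nat) : ∀ (x : Int),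
    pvIterParent dictionary (k + m) x =
      (pvIterParent dictionary k x).bind (pvIterParent dictionary m) := by
  induction k with
  | zero => intro x; simp [pvIterParent]
  | succ k ih =>
    intro x
    have : k + 1 + m = (k + m) + 1 := by omega
    rw [this]
    simp only [pvIterParent]
    cases PySem.Dict.get? (PySem.Dict.mk dictionary) x with
    | none => rfl
    | some p => simp only [Option.bind_some]; exact ih p

-- a root is a fixed point of every iterate
theorem pvIterParent_root (dictionary : List (Int × Int)) (r : Int)
    (hroot : PySem.Dict.get? (PySem.Dict.mk dictionary) r = some r) :
    ∀ (m : Nat), pvIterParent dictionary m r = some r := by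
  intro m
  induction m with
  | zero => rfl
  | succ m ih => simp only [pvIterParent, hroot, Option.bind_some]; exact ih

-- A's while-loop reaches the root announced by an iterate, given enough fuel
theorem pvWhileParent_of_iter (dictionary : List (Int × Int)) (k : Nat) :
    ∀ (x r : Int) (fuel : Nat), pvIterParent dictionary k x = some r →
      PySem.Dict.get? (PySem.Dict.mk dictionary) r = some r → k < fuel →
      pvWhileParent dictionary fuel x = some r := by
  induction k with
  | zero =>
    intro x r fuel hit hroot hfuel
    simp only [pvIterParent] at hit
    cases hit
    obtain ⟨f, rfl⟩ : ∃ g, fuel = g + 1 := ⟨fuel - 1, by omega⟩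
    simp [pvWhileParent, hroot]
  | succ k ih =>
    intro x r fuel hit hroot hfuel
    simp only [pvIterParent, Option.bind_eq_some_iff] at hit
    obtain ⟨p, hp, hit⟩ := hit
    obtain ⟨f, rfl⟩ : ∃ g, fuel = g + 1 := ⟨fuel - 1, by omega⟩
    simp only [pvWhileParent, hp]
    by_cases hxp : x = p
    · subst hxp
      have := pvIterParent_root dictionary x hp k
      rw [this] at hit
      cases hit
      simp
    · simpa [hxp] using ih p r f hit hroot (by omega)

-- each Pre_ conjunct pins down both ports' root for that node
theorem pvRoots_of_pre (dictionary : List (Int × Int)) (x : Int)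
    (h : ∃ k < dictionary.length + 1,
      (((fun o => o.bind (fun y => PySem.Dict.get? (PySem.Dict.mk dictionary) y))^[k]) (some x)).any
        (fun r => PySem.Dict.get? (PySem.Dict.mk dictionary) r == some r) = true) :
    ∃ r, pvWhileParent dictionary (dictionary.length + 1) x = some r ∧
         pvRootOf dictionary x = some r := by
  obtain ⟨k, hk, hany⟩ := h
  rw [← pvIterParent_eq_iterate] at hany
  cases hit : pvIterParent dictionary k x with
  | none => rw [hit] at hany; simp [Option.any] at hany
  | some r =>
    rw [hit] at hany
    simp only [Option.any, beq_iff_eq] at hany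
    refine ⟨r, pvWhileParent_of_iter dictionary k x r _ hit hany (by omega), ?_⟩
    have hsplit : dictionary.length = k + (dictionary.length - k) := by omega
    rw [pvRootOf_eq_iter, hsplit, pvIterParent_add, hit, Option.bind_some,
      pvIterParent_root dictionary r hany]

theorem int_bne_comm (a b : Int) : (a != b) = (b != a) := by
  by_cases h : a = b
  · subst h; rfl
  · rw [bne, bne, beq_eq_false_iff_ne.mpr h, beq_eq_false_iff_ne.mpr (Ne.symm h)]

-- ===== VERDICT (by name: the statement is the Claim_ definition above) =====
theorem notInSameSet_spec : Claim_equal_notInSameSet := by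
  intro source destination dictionary _ hpre
  obtain ⟨hs, ht⟩ := hpre
  obtain ⟨rs, hws, hbs⟩ := pvRoots_of_pre dictionary source hs
  obtain ⟨rt, hwt, hbt⟩ := pvRoots_of_pre dictionary destination ht
  unfold Spec_notInSameSet notInSameSet notInSameSet_alt
  rw [hws, hwt, hbs, hbt]
  simp [int_bne_comm]
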